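-- pv_equiv track=rewrite | github.com/wlinsk-gcy/StewardFlow | core/registry_summary.py | _dedupe_and_sort_tools
-- ===== SOURCE A (Python) =====
-- from typing import Any
--
-- def _safe_text(value: Any) -> str:
--     if value is None:
--         return ""
--     return str(value)
--
-- def _dedupe_and_sort_tools(raw_tools: list[dict[str, str]]) -> list[dict[str, str]]:
--     by_name: dict[str, dict[str, str]] = {}
--     for item in raw_tools:
--         name = _safe_text(item.get("name")).strip()
--         if not name:
--             continue
--         if name not in by_name:
--             by_name[name] = {
--                 "name": name,
--                 "description": _safe_text(item.get("description")).strip(),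
--             }
--     return sorted(by_name.values(), key=lambda item: item["name"])
-- ===== SOURCE B (Python) =====
-- from typing import Any
--
--
-- def _safe_text(value: Any) -> str:
--     if value is None:
--         return ""
--     return str(value)
--
--
-- def _dedupe_and_sort_tools(raw_tools: list[dict[str, str]]) -> list[dict[str, str]]:
--     entries = []
--     for item in raw_tools:
--         name = _safe_text(item.get("name")).strip()
--         if name:
--             entries.append({
--                 "name": name,
--                 "description": _safe_text(item.get("description")).strip(),
--             })
--     entries.sort(key=lambda e: e["name"])  # stable: first occurrence leads its run
--     result: list[dict[str, str]] = []
--     for e in entries: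
--         if not result or result[-1]["name"] != e["name"]:
--             result.append(e)
--     return result
-- ===== Notes on version B (the rewrite author's own statement) =====
-- stated objective: alternative
-- what changed: Replaces A's seen-name hash map (dedupe first, then sort the surviving dict values) by a stable sort of all normalized entries followed by a single adjacent-run scan that keeps the first entry of each equal-name run.
import Mathlib
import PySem

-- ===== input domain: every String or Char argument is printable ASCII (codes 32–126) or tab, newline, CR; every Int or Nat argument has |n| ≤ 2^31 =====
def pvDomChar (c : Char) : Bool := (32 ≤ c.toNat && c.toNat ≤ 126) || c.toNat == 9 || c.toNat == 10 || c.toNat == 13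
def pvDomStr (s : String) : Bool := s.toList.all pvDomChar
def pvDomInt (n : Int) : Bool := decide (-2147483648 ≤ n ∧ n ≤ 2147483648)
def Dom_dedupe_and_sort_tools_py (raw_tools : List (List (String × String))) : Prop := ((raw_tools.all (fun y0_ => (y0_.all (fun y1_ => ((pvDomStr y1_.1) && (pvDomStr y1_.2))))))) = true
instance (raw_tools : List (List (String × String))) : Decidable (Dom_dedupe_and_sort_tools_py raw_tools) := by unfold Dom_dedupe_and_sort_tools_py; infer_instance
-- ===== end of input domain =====

-- B replaces A's seen-name dict (dedupe first, then sort the dict values) by a stable sort of all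
-- normalized entries followed by one adjacent scan keeping the first entry of each equal-name run;
-- same cost class, different dedup mechanism.

-- shared helper: the sort key both Pythons use, `item["name"]` (every entry built by either
-- program carries the key "name", so Python's KeyError branch is unreachable; getD "" is exact there)
def pvKeyName (e : List (String × String)) : String :=
  PySem.Dict.getD (PySem.Dict.mk e) "name" ""

-- ===== PORT A =====
-- literal port of A: fold raw_tools into an insertion-ordered dict keyed by stripped name
-- (first occurrence wins), then sort its values by name.
-- `_safe_text(item.get(k)).strip()` = strip of the dict lookup with default "" (values are strings).
def dedupe_and_sort_tools_py (raw_tools : List (List (String × String))) : List (List (String × String)) :=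
  let by_name := raw_tools.foldl (fun d item =>
      let name := PySem.Str.strip (PySem.Dict.getD (PySem.Dict.mk item) "name" "")
      if name = "" then d
      else if d.contains name then d
      else d.insert name
        [("name", name),
         ("description", PySem.Str.strip (PySem.Dict.getD (PySem.Dict.mk item) "description" ""))])
    PySem.Dict.empty
  PySem.List.sorted by_name.values pvKeyName false

-- ===== PORT B =====
-- literal port of Source B: normalize+filter, stable sort by name, adjacent-run dedup (keep first).
def pvNormEntry (item : List (String × String)) : Option (List (String × String)) :=
  let name := PySem.Str.strip (PySem.Dict.getD (PySem.Dict.mk item) "name" "")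
  if name = "" then none
  else some
    [("name", name),
     ("description", PySem.Str.strip (PySem.Dict.getD (PySem.Dict.mk item) "description" ""))]

def dedupe_and_sort_tools_py_alt (raw_tools : List (List (String × String))) : List (List (String × String)) :=
  let entries := raw_tools.filterMap pvNormEntry
  let sortedE := PySem.List.sorted entries pvKeyName false
  sortedE.foldl (fun res e =>
    match res.getLast? with
    | none => res ++ [e]
    | some l => if pvKeyName l = pvKeyName e then res else res ++ [e]) []

-- ===== PRECONDITION & SPEC =====
def Spec_dedupe_and_sort_tools_py (raw_tools : List (List (String × String))) (out : List (List (String × String))) : Prop := out = dedupe_and_sort_tools_py_alt raw_tools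
instance (raw_tools : List (List (String × String))) (out : List (List (String × String))) : Decidable (Spec_dedupe_and_sort_tools_py raw_tools out) := by unfold Spec_dedupe_and_sort_tools_py; infer_instance

-- ===== CLAIM (what is proved, stated in full; the proofs are below) =====
def Claim_equal_dedupe_and_sort_tools_py : Prop := ∀ (raw_tools : List (List (String × String))), Dom_dedupe_and_sort_tools_py raw_tools → Spec_dedupe_and_sort_tools_py raw_tools (dedupe_and_sort_tools_py raw_tools)

-- ===== LEMMAS AND PROOFS =====

-- `pvKeep seen l`: the first entry of each name not in `seen` (A's dict keeps exactly these values)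
def pvKeep (seen : List String) : List (List (String × String)) → List (List (String × String))
  | [] => []
  | e :: t => if pvKeyName e ∈ seen then pvKeep seen t else e :: pvKeep (pvKeyName e :: seen) t

-- `pvGo last l`: adjacent-run dedup carrying the last kept name (B's second loop)
def pvGo (last : Option String) : List (List (String × String)) → List (List (String × String))
  | [] => []
  | e :: t => if last = some (pvKeyName e) then pvGo last t else e :: pvGo (some (pvKeyName e)) t

theorem pvKeyName_entry (n x : String) :
    pvKeyName [("name", n), ("description", x)] = n := rfl

theorem pvKeep_congr_seen (l : List (List (String × String))) :
    ∀ s1 s2 : List String, (∀ k, k ∈ s1 ↔ k ∈ s2) → pvKeep s1 l = pvKeep s2 l := by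
  induction l with
  | nil => intro _ _ _; rfl
  | cons e t ih =>
    intro s1 s2 h
    simp only [pvKeep]
    by_cases hm : pvKeyName e ∈ s1
    · rw [if_pos hm, if_pos ((h _).mp hm), ih _ _ h]
    · rw [if_neg hm, if_neg (fun hc => hm ((h _).mpr hc))]
      congr 1
      exact ih _ _ (by intro k; simp [h k])

-- A's dict loop, characterized: values accumulate `pvKeep` over the normalized entries
theorem pvA_fold (items : List (List (String × String))) :
    ∀ d : PySem.Dict String (List (String × String)),
      (items.foldl (fun d item =>
        let name := PySem.Str.strip (PySem.Dict.getD (PySem.Dict.mk item) "name" "")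
        if name = "" then d
        else if d.contains name then d
        else d.insert name
          [("name", name),
           ("description", PySem.Str.strip (PySem.Dict.getD (PySem.Dict.mk item) "description" ""))]) d).values
      = d.values ++ pvKeep d.keys (items.filterMap pvNormEntry) := by
  induction items with
  | nil => intro d; simp [pvKeep]
  | cons item rest ih =>
    intro d
    simp only [List.foldl_cons]
    set nm := PySem.Str.strip (PySem.Dict.getD (PySem.Dict.mk item) "name" "") with hnm_def
    set ds := PySem.Str.strip (PySem.Dict.getD (PySem.Dict.mk item) "description" "") with hds_def
    by_cases hn : nm = ""
    · have h0 : pvNormEntry item = none := by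
        simp only [pvNormEntry]
        rw [← hnm_def, if_pos hn]
      rw [if_pos hn, List.filterMap_cons_none h0]
      exact ih d
    · have h0 : pvNormEntry item = some [("name", nm), ("description", ds)] := by
        simp only [pvNormEntry]
        rw [← hnm_def, ← hds_def, if_neg hn]
      rw [if_neg hn, List.filterMap_cons_some h0]
      by_cases hc : d.contains nm = true
      · rw [if_pos hc, ih d]
        simp only [pvKeep, pvKeyName_entry]
        rw [if_pos ((PySem.Dict.contains_iff_mem_keys d nm).mp hc)]
      · rw [if_neg hc, ih _]
        have hc' : d.contains nm = false := by simpa using hc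
        have hvals : (d.insert nm [("name", nm), ("description", ds)]).values
            = d.values ++ [[("name", nm), ("description", ds)]] := by
          simp [PySem.Dict.values, PySem.Dict.items_insert_of_not_contains d _ hc']
        have hkeys : (d.insert nm [("name", nm), ("description", ds)]).keys = d.keys ++ [nm] := by
          simp [PySem.Dict.keys, PySem.Dict.items_insert_of_not_contains d _ hc']
        rw [hvals, hkeys]
        simp only [pvKeep, pvKeyName_entry]
        rw [if_neg (fun hmem => hc ((PySem.Dict.contains_iff_mem_keys d nm).mpr hmem))]
        rw [pvKeep_congr_seen _ (d.keys ++ [nm]) (nm :: d.keys) (by intro k; simp [or_comm])]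
        simp

-- B's second loop, characterized by pvGo
theorem pvB_fold (xs : List (List (String × String))) :
    ∀ res : List (List (String × String)),
      (xs.foldl (fun res e =>
        match res.getLast? with
        | none => res ++ [e]
        | some l => if pvKeyName l = pvKeyName e then res else res ++ [e]) res)
      = res ++ pvGo (res.getLast?.map pvKeyName) xs := by
  induction xs with
  | nil => intro res; simp [pvGo]
  | cons e t ih =>
    intro res
    simp only [List.foldl_cons]
    rcases h : res.getLast? with _ | l
    · obtain rfl : res = [] := List.getLast?_eq_none_iff.mp h
      simp only [List.nil_append, Option.map_none]
      rw [ih]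
      simp [pvGo, List.getLast?_singleton]
    · rw [show (match some l with
          | none => res ++ [e]
          | some l => if pvKeyName l = pvKeyName e then res else res ++ [e])
          = if pvKeyName l = pvKeyName e then res else res ++ [e] from rfl]
      by_cases hk : pvKeyName l = pvKeyName e
      · rw [if_pos hk, ih, h]
        simp [pvGo, hk]
      · rw [if_neg hk, ih, List.getLast?_concat]
        simp only [Option.map_some, pvGo]
        rw [if_neg (fun hc => hk (Option.some.inj hc))]
        simp
    

-- on a key-sorted list the adjacent-run dedup IS first-occurrence dedup
theorem pvGo_eq_keep (ys : List (List (String × String))) :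
    ∀ (last : Option String) (seen : List String),
      ys.Pairwise (fun a b => pvKeyName a ≤ pvKeyName b) →
      (∀ f ∈ ys, pvKeyName f ∈ seen ↔ last = some (pvKeyName f)) →
      (∀ f ∈ ys, ∀ k, last = some k → k ≤ pvKeyName f) →
      pvGo last ys = pvKeep seen ys := by
  induction ys with
  | nil => intro last seen _ _ _; rfl
  | cons e t ih =>
    intro last seen hp hseen hle
    simp only [pvGo, pvKeep]
    have he := hseen e (List.mem_cons_self)
    by_cases hc : last = some (pvKeyName e)
    · rw [if_pos hc, if_pos (he.mpr hc)]
      exact ih last seen hp.of_cons (fun f hf => hseen f (List.mem_cons_of_mem _ hf))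
        (fun f hf => hle f (List.mem_cons_of_mem _ hf))
    · rw [if_neg hc, if_neg (fun hm => hc (he.mp hm))]
      congr 1
      refine ih _ _ hp.of_cons ?_ ?_
      · intro f hf
        constructor
        · intro hm
          rcases List.mem_cons.mp hm with h1 | h1
          · rw [h1]
          · have h2 := (hseen f (List.mem_cons_of_mem _ hf)).mp h1
            have h3 := hle e List.mem_cons_self _ h2
            have h4 : pvKeyName e ≤ pvKeyName f := (List.pairwise_cons.mp hp).1 f hf
            have h5 : pvKeyName f = pvKeyName e := le_antisymm h3 h4
            exact absurd (h2.trans (by rw [h5])) hc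
        · intro hm
          exact List.mem_cons.mpr (Or.inl (Option.some.inj hm).symm)
      · intro f hf k hk
        obtain rfl : pvKeyName e = k := Option.some.inj hk
        exact (List.pairwise_cons.mp hp).1 f hf

theorem pvKeep_sublist (l : List (List (String × String))) (seen : List String) :
    (pvKeep seen l).Sublist l := by
  induction l generalizing seen with
  | nil => simp [pvKeep]
  | cons e t ih =>
    simp only [pvKeep]
    by_cases hm : pvKeyName e ∈ seen
    · rw [if_pos hm]; exact (ih seen).cons e
    · rw [if_neg hm]; exact (ih _).cons₂ e

theorem pvKeep_not_mem_seen (l : List (List (String × String))) :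
    ∀ seen e, e ∈ pvKeep seen l → pvKeyName e ∉ seen := by
  induction l with
  | nil => intro seen e h; simp [pvKeep] at h
  | cons f t ih =>
    intro seen e h
    simp only [pvKeep] at h
    by_cases hm : pvKeyName f ∈ seen
    · rw [if_pos hm] at h; exact ih seen e h
    · rw [if_neg hm] at h
      rcases List.mem_cons.mp h with h | h
      · subst h; exact hm
      · intro hc
        exact ih _ e h (List.mem_cons_of_mem _ hc)

theorem pvKeep_pairwise_ne (l : List (List (String × String))) (seen : List String) :
    (pvKeep seen l).Pairwise (fun a b => pvKeyName a ≠ pvKeyName b) := by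
  induction l generalizing seen with
  | nil => simp [pvKeep]
  | cons e t ih =>
    simp only [pvKeep]
    by_cases hm : pvKeyName e ∈ seen
    · rw [if_pos hm]; exact ih seen
    · rw [if_neg hm]
      refine List.Pairwise.cons ?_ (ih _)
      intro f hf heq
      exact pvKeep_not_mem_seen t _ f hf (by simp [heq])

theorem pvMem_keep_iff (l : List (List (String × String))) :
    ∀ (seen : List String) (e : List (String × String)), pvKeyName e ∉ seen →
      (e ∈ pvKeep seen l ↔ (l.filter (fun f => pvKeyName f == pvKeyName e)).head? = some e) := by
  induction l with
  | nil => intro seen e _; simp [pvKeep]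
  | cons f t ih =>
    intro seen e he
    simp only [pvKeep, List.filter_cons]
    by_cases hm : pvKeyName f ∈ seen
    · rw [if_pos hm]
      have hne : pvKeyName f ≠ pvKeyName e := fun hq => he (hq ▸ hm)
      rw [if_neg (by simpa using hne)]
      exact ih seen e he
    · rw [if_neg hm]
      by_cases heq : pvKeyName f = pvKeyName e
      · rw [if_pos (by simpa using heq), List.head?_cons]
        constructor
        · intro hmem
          rcases List.mem_cons.mp hmem with h1 | h1
          · rw [h1]
          · exact absurd (List.mem_cons_self) (heq ▸ pvKeep_not_mem_seen t _ e h1)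
        · intro hh
          exact List.mem_cons.mpr (Or.inl (Option.some.inj hh).symm)
      · rw [if_neg (by simpa using heq)]
        have he' : pvKeyName e ∉ pvKeyName f :: seen := by
          intro hc
          rcases List.mem_cons.mp hc with h1 | h1
          · exact heq h1.symm
          · exact he h1
        rw [← ih _ e he']
        constructor
        · intro hmem
          rcases List.mem_cons.mp hmem with h1 | h1
          · exact absurd (congrArg pvKeyName h1.symm) heq
          · exact h1
        · exact fun h1 => List.mem_cons_of_mem _ h1

-- stability of the sort, in the form used: filtering an equal-name class commutes with sorting
theorem pvFilter_insertBy_ne (l : List (List (String × String))) (x : List (String × String)) (k : String)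
    (h : pvKeyName x ≠ k) :
    (PySem.List.insertBy (fun a b => decide (pvKeyName a < pvKeyName b)) x l).filter (fun f => pvKeyName f == k)
      = l.filter (fun f => pvKeyName f == k) := by
  induction l with
  | nil =>
    simp only [PySem.List.insertBy, List.filter_cons, List.filter_nil]
    rw [if_neg (by simpa using h)]
  | cons y t ih =>
    simp only [PySem.List.insertBy]
    by_cases hp : decide (pvKeyName x < pvKeyName y) = true
    · rw [if_pos hp]
      simp only [List.filter_cons]
      rw [if_neg (by simpa using h)]
    · rw [if_neg hp]
      simp only [List.filter_cons]
      by_cases hy : (pvKeyName y == k) = true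
      · rw [if_pos hy, if_pos hy, ih]
      · rw [if_neg hy, if_neg hy, ih]

theorem pvFilter_insertBy_eq (l : List (List (String × String))) (x : List (String × String))
    (hs : l.Pairwise (fun a b => pvKeyName a ≤ pvKeyName b)) :
    (PySem.List.insertBy (fun a b => decide (pvKeyName a < pvKeyName b)) x l).filter (fun f => pvKeyName f == pvKeyName x)
      = l.filter (fun f => pvKeyName f == pvKeyName x) ++ [x] := by
  induction l with
  | nil => simp [PySem.List.insertBy]
  | cons y t ih =>
    simp only [PySem.List.insertBy]
    by_cases hp : decide (pvKeyName x < pvKeyName y) = true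
    · rw [if_pos hp]
      have hlt : pvKeyName x < pvKeyName y := of_decide_eq_true hp
      have hnil : (y :: t).filter (fun f => pvKeyName f == pvKeyName x) = [] := by
        rw [List.filter_eq_nil_iff]
        intro f hf
        have : pvKeyName y ≤ pvKeyName f := by
          rcases List.mem_cons.mp hf with h1 | h1
          · rw [h1]
          · exact (List.pairwise_cons.mp hs).1 f h1
        simp only [beq_iff_eq]
        intro hq
        exact absurd (hq ▸ hlt) (not_lt.mpr this)
      rw [List.filter_cons_of_pos (by simp), hnil]
      simp
    · rw [if_neg hp]
      simp only [List.filter_cons]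
      by_cases hy : (pvKeyName y == pvKeyName x) = true
      · rw [if_pos hy, if_pos hy, ih hs.of_cons]
        simp
      · rw [if_neg hy, if_neg hy, ih hs.of_cons]

theorem pvFilter_sorted (xs : List (List (String × String))) (k : String) :
    (PySem.List.sorted xs pvKeyName false).filter (fun f => pvKeyName f == k)
      = xs.filter (fun f => pvKeyName f == k) := by
  induction xs using List.reverseRecOn with
  | nil => simp [PySem.List.sorted]
  | append_singleton t x ih =>
    have hrw : PySem.List.sorted (t ++ [x]) pvKeyName false
        = PySem.List.insertBy (fun a b => decide (pvKeyName a < pvKeyName b)) x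
            (PySem.List.sorted t pvKeyName false) := by
      rw [PySem.List.sorted_eq_foldl_insertBy, PySem.List.sorted_eq_foldl_insertBy, List.foldl_append,
        List.foldl_cons, List.foldl_nil]
    rw [hrw, List.filter_append, List.filter_cons, List.filter_nil]
    by_cases hx : (pvKeyName x == k) = true
    · obtain rfl : pvKeyName x = k := eq_of_beq hx
      rw [pvFilter_insertBy_eq _ _ (PySem.List.sorted_pairwise t pvKeyName), ih]
      simp
    · rw [pvFilter_insertBy_ne _ _ _ (by simpa using hx), ih, if_neg hx]
      simp

theorem pvKeep_nodup (l : List (List (String × String))) (seen : List String) :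
    (pvKeep seen l).Nodup := by
  have h := pvKeep_pairwise_ne l seen
  exact List.Pairwise.imp (fun hne heq => hne (congrArg pvKeyName heq)) h

theorem pvMain (entries : List (List (String × String))) :
    PySem.List.sorted (pvKeep [] entries) pvKeyName false
      = pvKeep [] (PySem.List.sorted entries pvKeyName false) := by
  apply PySem.List.sorted_eq_of_perm_of_pairwise_lt
  · apply (List.perm_ext_iff_of_nodup (pvKeep_nodup _ _) (pvKeep_nodup _ _)).mpr
    intro e
    rw [pvMem_keep_iff _ [] e (by simp), pvMem_keep_iff _ [] e (by simp), pvFilter_sorted]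
  · have h1 : (pvKeep [] (PySem.List.sorted entries pvKeyName false)).Pairwise
        (fun a b => pvKeyName a ≤ pvKeyName b) :=
      (PySem.List.sorted_pairwise entries pvKeyName).sublist (pvKeep_sublist _ _)
    have h2 := pvKeep_pairwise_ne (PySem.List.sorted entries pvKeyName false) []
    exact (h1.and h2).imp (fun ⟨hle, hne⟩ => lt_of_le_of_ne hle hne)

-- ===== VERDICT (by name: the statement is the Claim_ definition above) =====
theorem dedupe_and_sort_tools_py_spec : Claim_equal_dedupe_and_sort_tools_py := by
  intro raw_tools _
  show dedupe_and_sort_tools_py raw_tools = dedupe_and_sort_tools_py_alt raw_tools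
  simp only [dedupe_and_sort_tools_py, dedupe_and_sort_tools_py_alt]
  rw [pvA_fold, pvB_fold]
  have hempty_v : (PySem.Dict.empty : PySem.Dict String (List (String × String))).values = [] := rfl
  have hempty_k : (PySem.Dict.empty : PySem.Dict String (List (String × String))).keys = [] := rfl
  rw [hempty_v, hempty_k]
  simp only [List.nil_append, List.getLast?_nil, Option.map_none]
  rw [pvMain, pvGo_eq_keep _ none [] (PySem.List.sorted_pairwise _ _) (by simp) (by simp)]
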